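-- pv_equiv track=rewrite | github.com/adrian-valente/advent-of-code | day8/main.py | get_positions_per_freq
-- ===== SOURCE A (Python) =====
-- def get_positions_per_freq(lines):
--     positions_per_freq = dict()
--     for i, line in enumerate(lines):
--         for j, c in enumerate(line):
--             if c != ".":
--                 if c not in positions_per_freq:
--                     positions_per_freq[c] = []
--                 positions_per_freq[c].append((i, j))
--     return positions_per_freq
-- ===== SOURCE B (Python) =====
-- def get_positions_per_freq(lines):
--     # Two-pass: flatten the grid into (char, position) cells, then build the
--     # result per first-occurrence key by filtering the flat list.
--     cells = [(c, (i, j))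
--              for i, line in enumerate(lines)
--              for j, c in enumerate(line)
--              if c != "."]
--     return {c: [p for cc, p in cells if cc == c]
--             for c in dict.fromkeys(cc for cc, _ in cells)}
-- ===== Notes on version B (the rewrite author's own statement) =====
-- stated objective: alternative
-- what changed: Replaced A's single-pass loop that mutates a dict (insert-if-absent then append) by a two-pass decomposition: flatten the grid into a (char, position) cell list, then build the result as a dict comprehension over the first-occurrence-deduplicated keys, filtering the flat list per key.
import Mathlib
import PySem

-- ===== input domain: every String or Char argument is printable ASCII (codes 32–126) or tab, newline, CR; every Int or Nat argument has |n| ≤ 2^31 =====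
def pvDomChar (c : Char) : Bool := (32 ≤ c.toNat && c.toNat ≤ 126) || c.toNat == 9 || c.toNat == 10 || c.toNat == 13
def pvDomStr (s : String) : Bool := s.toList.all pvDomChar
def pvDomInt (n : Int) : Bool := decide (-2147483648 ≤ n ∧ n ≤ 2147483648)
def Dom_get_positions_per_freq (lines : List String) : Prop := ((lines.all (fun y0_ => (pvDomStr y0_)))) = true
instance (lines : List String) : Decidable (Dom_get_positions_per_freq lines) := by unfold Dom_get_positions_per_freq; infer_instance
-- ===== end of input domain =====

-- B replaces A's incremental dict-mutation loop by a two-pass decomposition (flatten the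
-- grid to (char, position) cells, then build each key's list by filtering); objective: alternative.

-- ===== PORT A =====
def get_positions_per_freq (lines : List String) : List (String × List (Int × Int)) :=
  let d : PySem.Dict String (List (Int × Int)) :=
    (PySem.List.enumerate lines 0).foldl
      (fun d il =>
        (PySem.List.enumerate il.2.toList 0).foldl
          (fun d jc =>
            if jc.2 ≠ '.' then
              let key := String.ofList [jc.2]
              let d := if d.contains key then d else d.insert key []
              d.insert key (d.getD key [] ++ [(il.1, jc.1)])
            else d)
          d)
      PySem.Dict.empty
  d.items

-- ===== PORT B =====
def get_positions_per_freq_alt (lines : List String) : List (String × List (Int × Int)) :=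
  let cells : List (String × (Int × Int)) :=
    (PySem.List.enumerate lines 0).flatMap (fun il =>
      ((PySem.List.enumerate il.2.toList 0).filter (fun jc => jc.2 ≠ '.')).map
        (fun jc => (String.ofList [jc.2], (il.1, jc.1))))
  (PySem.List.dedup (cells.map (·.1))).map
    (fun c => (c, (cells.filter (fun p => p.1 == c)).map (·.2)))

-- ===== PRECONDITION & SPEC =====
def Spec_get_positions_per_freq (lines : List String) (out : List (String × List (Int × Int))) : Prop := out = get_positions_per_freq_alt lines
instance (lines : List String) (out : List (String × List (Int × Int))) : Decidable (Spec_get_positions_per_freq lines out) := by unfold Spec_get_positions_per_freq; infer_instance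

-- ===== CLAIM (what is proved, stated in full; the proofs are below) =====
def Claim_equal_get_positions_per_freq : Prop := ∀ (lines : List String), Dom_get_positions_per_freq lines → Spec_get_positions_per_freq lines (get_positions_per_freq lines)

-- ===== LEMMAS AND PROOFS =====

-- the flat cell list of B, as a named definition for the proofs
def pvCells (lines : List String) : List (String × (Int × Int)) :=
  (PySem.List.enumerate lines 0).flatMap (fun il =>
    ((PySem.List.enumerate il.2.toList 0).filter (fun jc => jc.2 ≠ '.')).map
      (fun jc => (String.ofList [jc.2], (il.1, jc.1))))

-- A's loop body (insert-if-absent, then append) is exactly Dict.modify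
theorem pvStep_eq (d : PySem.Dict String (List (Int × Int))) (k : String) (v : Int × Int) :
    (if d.contains k then d else d.insert k []).insert k
      ((if d.contains k then d else d.insert k []).getD k [] ++ [v])
    = d.modify k [] (· ++ [v]) := by
  show _ = d.insert k (d.getD k [] ++ [v])
  by_cases hc : d.contains k
  · simp [hc]
  · simp only [Bool.not_eq_true] at hc
    rw [if_neg (by simp [hc]), PySem.Dict.getD_insert_self, PySem.Dict.insert_insert_self,
      PySem.Dict.getD_of_not_contains d [] hc, List.nil_append]

-- A's nested enumerate loops are a single modify-fold over the flat cell list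
theorem pvFoldA_eq (lines : List String) :
    ((PySem.List.enumerate lines 0).foldl
      (fun d il =>
        (PySem.List.enumerate il.2.toList 0).foldl
          (fun d jc =>
            if jc.2 ≠ '.' then
              let key := String.ofList [jc.2]
              let d := if d.contains key then d else d.insert key []
              d.insert key (d.getD key [] ++ [(il.1, jc.1)])
            else d)
          d)
      (PySem.Dict.empty : PySem.Dict String (List (Int × Int))))
    = (pvCells lines).foldl (fun d p => d.modify p.1 [] (· ++ [p.2])) PySem.Dict.empty := by
  rw [pvCells, List.foldl_flatMap]
  apply PySem.List.foldl_congr_mem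
  intro d il _
  rw [List.foldl_map, List.foldl_filter]
  apply PySem.List.foldl_congr_mem
  intro d jc _
  by_cases h : jc.2 = '.'
  · simp [h]
  · rw [if_pos h, if_pos (by simp [h])]
    exact pvStep_eq d (String.ofList [jc.2]) (il.1, jc.1)

theorem get_positions_per_freq_eq_alt (lines : List String) :
    get_positions_per_freq lines = get_positions_per_freq_alt lines := by
  have halt : get_positions_per_freq_alt lines
      = (PySem.List.dedup ((pvCells lines).map (·.1))).map
          (fun c => (c, ((pvCells lines).filter (fun p => p.1 == c)).map (·.2))) := rfl
  rw [get_positions_per_freq, halt]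
  show ((PySem.List.enumerate lines 0).foldl _ PySem.Dict.empty).items = _
  rw [pvFoldA_eq]
  have hnd : (((pvCells lines).foldl (fun d p => d.modify p.1 [] (· ++ [p.2])) PySem.Dict.empty)).keys.Nodup :=
    PySem.Dict.nodup_keys_foldl_modify_key (pvCells lines) (·.1) [] (fun _ p => (· ++ [p.2]))
      PySem.Dict.empty (by simp)
  rw [PySem.Dict.items_eq_map_keys _ hnd []]
  have hkeys : (((pvCells lines).foldl (fun d p => d.modify p.1 [] (· ++ [p.2])) PySem.Dict.empty)).keys
      = PySem.List.dedup ((pvCells lines).map (·.1)) := by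
    rw [PySem.Dict.keys_foldl_modify_key (pvCells lines) (·.1) [] (fun _ p => (· ++ [p.2])) PySem.Dict.empty]
    simp [PySem.Dict.keys_empty, PySem.Set.update, PySem.Set.ofList_eq_foldl,
      PySem.List.dedup_eq_ofList]
  rw [hkeys]
  refine List.map_congr_left (fun c _ => ?_)
  congr 1
  rw [PySem.Dict.getD_foldl_modify_append, PySem.Dict.getD_empty]
  simp

-- ===== VERDICT (by name: the statement is the Claim_ definition above) =====
theorem get_positions_per_freq_spec : Claim_equal_get_positions_per_freq := by
  intro lines _
  exact get_positions_per_freq_eq_alt lines
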